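-- pv_equiv track=rewrite | github.com/CrystalShann/fiber-seq-footprint-analysis | TADs_m6a_footprint_overlay_code/build_region_overlay_tracks.py | select_read_order
-- ===== SOURCE A (Python) =====
-- def select_read_order(read_spans, max_reads):
--     ordered = sorted(
--         read_spans.items(),
--         key=lambda item: (-item[1]["overlap_bp"], -item[1]["feature_count"], item[1]["start"], item[0]),
--     )
--     if max_reads and len(ordered) > max_reads:
--         ordered = ordered[:max_reads]
--     return [read_id for read_id, _ in ordered]
-- ===== SOURCE B (Python) =====
-- import heapq
--
--
-- def select_read_order(read_spans, max_reads):
--     span_key = lambda item: (-item[1]["overlap_bp"], -item[1]["feature_count"], item[1]["start"], item[0])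
--     if max_reads:
--         ordered = heapq.nsmallest(max_reads, read_spans.items(), key=span_key)
--     else:
--         ordered = sorted(read_spans.items(), key=span_key)
--     return [read_id for read_id, _ in ordered]
-- ===== Notes on version B (the rewrite author's own statement) =====
-- stated objective: faster
-- what changed: When a read cap is set, B selects the top max_reads items with heapq.nsmallest (a bounded-heap partial selection in one pass) instead of A's unconditional full sort followed by a slice; the full sorted() remains only on the falsy-cap path.
-- intended difference: For a negative max_reads with more reads than |max_reads|, A returns the sorted order with the last |max_reads| entries dropped (an artifact of Python's negative slice ordered[:max_reads]), while B returns [], the intended result of capping the output at fewer than zero reads. — e.g. on select_read_order(([("a", [("overlap_bp", 1), ("feature_count", 1), ("start", 0)]), ("b", [("overlap_bp", 2), ("feature_count", 1), ("sta…): A returns ["b"], B returns []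
import Mathlib
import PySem

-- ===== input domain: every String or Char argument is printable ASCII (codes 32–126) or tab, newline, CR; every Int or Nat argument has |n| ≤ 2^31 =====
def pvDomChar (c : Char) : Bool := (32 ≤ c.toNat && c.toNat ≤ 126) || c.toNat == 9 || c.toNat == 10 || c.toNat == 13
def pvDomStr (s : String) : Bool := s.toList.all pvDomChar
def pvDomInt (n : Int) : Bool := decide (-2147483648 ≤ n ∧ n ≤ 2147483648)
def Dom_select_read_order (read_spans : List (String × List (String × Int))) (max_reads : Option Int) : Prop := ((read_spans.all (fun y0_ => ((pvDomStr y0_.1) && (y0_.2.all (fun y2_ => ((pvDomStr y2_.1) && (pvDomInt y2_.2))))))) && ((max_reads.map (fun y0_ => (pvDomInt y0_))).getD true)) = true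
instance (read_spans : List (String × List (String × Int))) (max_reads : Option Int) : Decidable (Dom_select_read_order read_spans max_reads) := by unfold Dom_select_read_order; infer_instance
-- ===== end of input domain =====

-- B replaces A's unconditional full sort + slice by a heap-based partial selection
-- (heapq.nsmallest) when a read cap is set; equivalence is proved outside D_ below
-- (negative caps), where B returns [] instead of A's negative-slice artifact.

-- ===== PORT A =====
-- The composite sort key (shared lambda of A and B):
-- (-item[1]["overlap_bp"], -item[1]["feature_count"], item[1]["start"], item[0]).
-- Python tuples compare lexicographically, hence the ×ₗ (Prod.Lex) key type; the
-- string component is compared as its code-point list (Python's string order).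
-- The inner-dict lookups raise KeyError on a missing key; `getD … 0` is exact only
-- under Pre_select_read_order, which requires the three keys to be present.
def pvSpanKey (p : String × List (String × Int)) : Int ×ₗ Int ×ₗ Int ×ₗ List Char :=
  toLex (-((PySem.Dict.mk p.2).getD "overlap_bp" 0),
    toLex (-((PySem.Dict.mk p.2).getD "feature_count" 0),
      toLex ((PySem.Dict.mk p.2).getD "start" 0, p.1.toList)))

def select_read_order (read_spans : List (String × List (String × Int))) (max_reads : Option Int) : List String :=
  -- ordered = sorted(read_spans.items(), key=…)
  let ordered := PySem.List.sorted (PySem.Dict.ofList read_spans).items pvSpanKey false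
  -- if max_reads and len(ordered) > max_reads: ordered = ordered[:max_reads]
  let ordered : List (String × List (String × Int)) :=
    match max_reads with
    | none => ordered
    | some m =>
        if m ≠ 0 ∧ m < PySem.List.len ordered then PySem.List.slice ordered none (some m)
        else ordered
  -- return [read_id for read_id, _ in ordered]
  ordered.map (fun p => p.1)

-- ===== PORT B =====
-- heapq.nsmallest n xs key, ported by its documented contract:
-- the n smallest elements by key in ascending order = sorted(xs, key=key)[:n], [] for n ≤ 0.
def pyNSmallest {α κ : Type} [LT κ] [DecidableLT κ] (n : Int) (xs : List α) (key : α → κ) : List α :=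
  (PySem.List.sorted xs key false).take n.toNat

def select_read_order_alt (read_spans : List (String × List (String × Int))) (max_reads : Option Int) : List String :=
  let ordered : List (String × List (String × Int)) :=
    match max_reads with
    | some m =>
        if m ≠ 0 then pyNSmallest m (PySem.Dict.ofList read_spans).items pvSpanKey
        else PySem.List.sorted (PySem.Dict.ofList read_spans).items pvSpanKey false
    | none => PySem.List.sorted (PySem.Dict.ofList read_spans).items pvSpanKey false
  ordered.map (fun p => p.1)

-- ===== PRECONDITION & SPEC =====
-- Python A raises KeyError unless every (kept) per-read dict has the three keys
-- "overlap_bp", "feature_count" and "start"; Pre_ admits exactly the inputs where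
-- every value dict of the mapping has them (so every lookup A performs succeeds).
def Pre_select_read_order (read_spans : List (String × List (String × Int))) (max_reads : Option Int) : Prop :=
  ∀ p ∈ (PySem.Dict.ofList read_spans).items,
    "overlap_bp" ∈ p.2.map Prod.fst ∧ "feature_count" ∈ p.2.map Prod.fst ∧ "start" ∈ p.2.map Prod.fst
instance (read_spans : List (String × List (String × Int))) (max_reads : Option Int) : Decidable (Pre_select_read_order read_spans max_reads) := by unfold Pre_select_read_order; infer_instance

def pvWitness_select_read_order : (List (String × List (String × Int))) × Option Int :=
  ([("r1", [("overlap_bp", 5), ("feature_count", 1), ("start", 0)]),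
    ("r2", [("overlap_bp", 7), ("feature_count", 2), ("start", 3)])], some 1)

-- On a NEGATIVE max_reads over more reads than |max_reads|, A returns the sorted order
-- with the last |max_reads| entries dropped — an artifact of Python's negative slice
-- ordered[:max_reads] — while B returns [], the intended result of a cap of fewer than
-- zero reads.
def D_select_read_order (read_spans : List (String × List (String × Int))) (max_reads : Option Int) : Prop :=
  max_reads.getD 0 < 0 ∧ -(max_reads.getD 0) < ((PySem.List.dedup (read_spans.map Prod.fst)).length : Int)
instance (read_spans : List (String × List (String × Int))) (max_reads : Option Int) : Decidable (D_select_read_order read_spans max_reads) := by unfold D_select_read_order; infer_instance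

def Spec_select_read_order (read_spans : List (String × List (String × Int))) (max_reads : Option Int) (out : List String) : Prop := ¬ D_select_read_order read_spans max_reads → out = select_read_order_alt read_spans max_reads
instance (read_spans : List (String × List (String × Int))) (max_reads : Option Int) (out : List String) : Decidable (Spec_select_read_order read_spans max_reads out) := by unfold Spec_select_read_order; infer_instance

def pvDiffWitness_select_read_order : (List (String × List (String × Int))) × Option Int :=
  ([("a", [("overlap_bp", 1), ("feature_count", 1), ("start", 0)]),
    ("b", [("overlap_bp", 2), ("feature_count", 1), ("start", 0)])], some (-1))

def pvDiffWitnessOut_select_read_order : (List String) × (List String) := (["b"], [])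

-- ===== CLAIM (what is proved, stated in full; the proofs are below) =====
def Claim_unchanged_select_read_order : Prop := ∀ (read_spans : List (String × List (String × Int))) (max_reads : Option Int), Dom_select_read_order read_spans max_reads → Pre_select_read_order read_spans max_reads → Spec_select_read_order read_spans max_reads (select_read_order read_spans max_reads)
def Claim_changed_select_read_order : Prop := Dom_select_read_order (pvDiffWitness_select_read_order.1) (pvDiffWitness_select_read_order.2) ∧ Pre_select_read_order (pvDiffWitness_select_read_order.1) (pvDiffWitness_select_read_order.2) ∧ D_select_read_order (pvDiffWitness_select_read_order.1) (pvDiffWitness_select_read_order.2) ∧ select_read_order (pvDiffWitness_select_read_order.1) (pvDiffWitness_select_read_order.2) = pvDiffWitnessOut_select_read_order.1 ∧ select_read_order_alt (pvDiffWitness_select_read_order.1) (pvDiffWitness_select_read_order.2) = pvDiffWitnessOut_select_read_order.2 ∧ pvDiffWitnessOut_select_read_order.1 ≠ pvDiffWitnessOut_select_read_order.2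
def Claim_exact_select_read_order : Prop := ∀ (read_spans : List (String × List (String × Int))) (max_reads : Option Int), Dom_select_read_order read_spans max_reads → Pre_select_read_order read_spans max_reads → D_select_read_order read_spans max_reads → select_read_order read_spans max_reads ≠ select_read_order_alt read_spans max_reads

-- ===== LEMMAS AND PROOFS =====

-- The number of items of dict(read_spans) is the number of distinct outer keys.
theorem pv_items_length (l : List (String × List (String × Int))) :
    ((PySem.Dict.ofList l).items).length = (PySem.List.dedup (l.map Prod.fst)).length := by
  have h1 : (PySem.Dict.ofList l).keys
      = PySem.Set.update (PySem.Dict.empty (κ := String) (ν := List (String × Int))).keys (l.map Prod.fst) :=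
    PySem.Dict.keys_foldl_insert_key l Prod.fst (fun _ p => p.2) PySem.Dict.empty
  have h2 : (PySem.Dict.ofList l).keys.length = (PySem.List.dedup (l.map Prod.fst)).length := by
    rw [h1]; simp [PySem.Dict.keys_empty, PySem.Set.update_nil_left]
  simpa [PySem.Dict.keys] using h2

theorem pv_unchanged (read_spans : List (String × List (String × Int))) (max_reads : Option Int)
    (hD : ¬ D_select_read_order read_spans max_reads) :
    select_read_order read_spans max_reads = select_read_order_alt read_spans max_reads := by
  unfold select_read_order select_read_order_alt
  cases max_reads with
  | none => rfl
  | some m =>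
    simp only []
    set S := PySem.List.sorted (PySem.Dict.ofList read_spans).items pvSpanKey false with hS
    by_cases hm0 : m = 0
    · simp [hm0]
    · rcases lt_trichotomy m 0 with hneg | hz | hpos
      · -- m < 0: A's condition holds and ordered[:m] is empty; B takes m.toNat = 0 elements
        have hdlen : ((PySem.List.dedup (read_spans.map Prod.fst)).length : Int) ≤ -m := by
          unfold D_select_read_order at hD
          simp only [Option.getD_some] at hD
          by_contra hlt
          exact hD ⟨hneg, by omega⟩
        have hSlen : (S.length : Int) ≤ -m := by
          rw [hS, PySem.List.length_sorted, pv_items_length]; exact hdlen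
        have hcond : m ≠ 0 ∧ m < PySem.List.len S :=
          ⟨hm0, by rw [PySem.List.len_eq]; omega⟩
        have hk : 0 < (-m).toNat := by omega
        have hsl : PySem.List.slice S none (some m) = List.take (S.length - (-m).toNat) S := by
          have h := PySem.List.slice_to_neg_natCast S (-m).toNat hk
          rwa [show (-(((-m).toNat : Nat) : Int)) = m by omega] at h
        have hB : pyNSmallest m (PySem.Dict.ofList read_spans).items pvSpanKey = ([] : List (String × List (String × Int))) := by
          unfold pyNSmallest
          rw [← hS, show m.toNat = 0 by omega, List.take_zero]
        rw [if_pos hcond, if_pos hm0, hsl, hB, show S.length - (-m).toNat = 0 by omega,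
          List.take_zero]
      · exact absurd hz hm0
      · -- 0 < m: both sides are take m.toNat of the sorted list (A slices only when shorter)
        by_cases hlt : m < PySem.List.len S
        · have hsl : PySem.List.slice S none (some m) = List.take m.toNat S := by
            have h := PySem.List.slice_to_natCast S m.toNat
            rwa [show ((m.toNat : Nat) : Int) = m by omega] at h
          rw [if_pos ⟨hm0, hlt⟩, if_pos hm0, hsl]
          unfold pyNSmallest
          rw [← hS]
        · have hlen : S.length ≤ m.toNat := by
            rw [PySem.List.len_eq] at hlt; omega
          rw [if_neg (by tauto), if_pos hm0]
          unfold pyNSmallest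
          rw [← hS, List.take_of_length_le hlen]

theorem pv_tight (read_spans : List (String × List (String × Int))) (max_reads : Option Int)
    (hD : D_select_read_order read_spans max_reads) :
    select_read_order read_spans max_reads ≠ select_read_order_alt read_spans max_reads := by
  unfold D_select_read_order at hD
  cases max_reads with
  | none => simp at hD
  | some m =>
    simp only [Option.getD_some] at hD
    obtain ⟨hneg, hlt⟩ := hD
    intro heq
    unfold select_read_order select_read_order_alt at heq
    simp only [] at heq
    set S := PySem.List.sorted (PySem.Dict.ofList read_spans).items pvSpanKey false with hS
    have hSlen : -m < (S.length : Int) := by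
      rw [hS, PySem.List.length_sorted, pv_items_length]; exact hlt
    have hm0 : m ≠ 0 := by omega
    have hcond : m ≠ 0 ∧ m < PySem.List.len S :=
      ⟨hm0, by rw [PySem.List.len_eq]; omega⟩
    have hk : 0 < (-m).toNat := by omega
    have hsl : PySem.List.slice S none (some m) = List.take (S.length - (-m).toNat) S := by
      have h := PySem.List.slice_to_neg_natCast S (-m).toNat hk
      rwa [show (-(((-m).toNat : Nat) : Int)) = m by omega] at h
    have hB : pyNSmallest m (PySem.Dict.ofList read_spans).items pvSpanKey = ([] : List (String × List (String × Int))) := by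
      unfold pyNSmallest
      rw [← hS, show m.toNat = 0 by omega, List.take_zero]
    rw [if_pos hcond, if_pos hm0, hsl, hB, List.map_nil] at heq
    apply_fun List.length at heq
    simp only [List.length_map, List.length_take, List.length_nil] at heq
    omega

-- ===== VERDICT (by name: the statement is the Claim_ definition above) =====
theorem select_read_order_spec : Claim_unchanged_select_read_order := by
  intro read_spans max_reads _ _ hD
  exact pv_unchanged read_spans max_reads hD

theorem select_read_order_changed : Claim_changed_select_read_order := by
  unfold Claim_changed_select_read_order; decide

theorem select_read_order_tight : Claim_exact_select_read_order := by
  intro read_spans max_reads _ _ hD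
  exact pv_tight read_spans max_reads hD
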